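-- pv_equiv track=rewrite | github.com/henryhardigan/contact-alignment | src/pocket_pipeline/pairdist_hardcut.py | expand_alias_tokens
-- ===== SOURCE A (Python) =====
-- def expand_alias_tokens(tokens, acc_to_entries, entry_to_acc, rounds=2):
--     cur = set(tokens)
--     for _ in range(rounds):
--         add = set()
--         for t in list(cur):
--             add |= acc_to_entries.get(t, set())
--             add |= entry_to_acc.get(t, set())
--         if add.issubset(cur):
--             break
--         cur |= add
--     return cur
-- ===== SOURCE B (Python) =====
-- def expand_alias_tokens(tokens, acc_to_entries, entry_to_acc, rounds=2):
--     seen = set(tokens)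
--     frontier = list(dict.fromkeys(tokens))
--     for _ in range(rounds):
--         new = []
--         for t in frontier:
--             for u in acc_to_entries.get(t, ()):
--                 if u not in seen:
--                     seen.add(u)
--                     new.append(u)
--             for u in entry_to_acc.get(t, ()):
--                 if u not in seen:
--                     seen.add(u)
--                     new.append(u)
--         if not new:
--             break
--         frontier = new
--     return seen
-- ===== Notes on version B (the rewrite author's own statement) =====
-- stated objective: faster
-- what changed: B replaces A's per-round rescan of the entire accumulated set by a frontier BFS that scans only the tokens newly added in the previous round, collecting unseen neighbours in one pass.
import Mathlib
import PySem

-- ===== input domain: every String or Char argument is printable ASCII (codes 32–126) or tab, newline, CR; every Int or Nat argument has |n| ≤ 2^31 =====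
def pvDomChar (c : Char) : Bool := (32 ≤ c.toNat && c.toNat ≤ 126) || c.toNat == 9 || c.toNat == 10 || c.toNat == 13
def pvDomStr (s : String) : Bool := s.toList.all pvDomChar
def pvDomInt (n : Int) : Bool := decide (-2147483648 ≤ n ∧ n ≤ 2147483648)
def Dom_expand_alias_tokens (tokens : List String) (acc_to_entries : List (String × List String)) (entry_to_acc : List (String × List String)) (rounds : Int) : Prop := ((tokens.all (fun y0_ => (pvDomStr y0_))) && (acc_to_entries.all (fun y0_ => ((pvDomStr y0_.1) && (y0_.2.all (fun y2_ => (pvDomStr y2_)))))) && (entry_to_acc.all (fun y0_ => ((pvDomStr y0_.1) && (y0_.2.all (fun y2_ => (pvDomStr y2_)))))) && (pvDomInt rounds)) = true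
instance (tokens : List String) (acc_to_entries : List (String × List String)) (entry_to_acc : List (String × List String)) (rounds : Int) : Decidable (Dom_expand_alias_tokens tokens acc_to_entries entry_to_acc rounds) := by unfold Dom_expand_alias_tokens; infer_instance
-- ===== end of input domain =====

-- B replaces A's rescan of the whole current set each round by a frontier BFS that scans only
-- the tokens newly added in the previous round (objective: faster). Return-value equivalence;
-- the ports agree on the returned Python sets as lists in first-insertion order.

-- ===== PORT A =====
-- A's per-round inner loop: add = set(); for t in cur: add |= a2e.get(t,set()); add |= e2a.get(t,set())
def pvA_round (a2e e2a : PySem.Dict String (List String)) (cur : PySem.Set String) : PySem.Set String :=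
  cur.foldl (fun add t =>
    PySem.Set.union (PySem.Set.union add (a2e.getD t [])) (e2a.getD t [])) PySem.Set.empty

-- A's 'for _ in range(rounds)' loop with the early break
def pvA_loop (a2e e2a : PySem.Dict String (List String)) : Nat → PySem.Set String → PySem.Set String
  | 0, cur => cur
  | n+1, cur =>
    let add := pvA_round a2e e2a cur
    if PySem.Set.issubset add cur then cur
    else pvA_loop a2e e2a n (PySem.Set.union cur add)

def expand_alias_tokens (tokens : List String) (acc_to_entries : List (String × List String)) (entry_to_acc : List (String × List String)) (rounds : Int) : List String :=
  pvA_loop (PySem.Dict.mk acc_to_entries) (PySem.Dict.mk entry_to_acc) rounds.toNat (PySem.Set.ofList tokens)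

-- ===== PORT B =====
-- Source B inner loop: for u in vals: if u not in seen: seen.add(u); new.append(u)
def pvB_scan (vals : List String) (p : PySem.Set String × List String) : PySem.Set String × List String :=
  vals.foldl (fun p u => if PySem.Set.contains p.1 u then p else (PySem.Set.add p.1 u, p.2 ++ [u])) p

-- Source B 'for _ in range(rounds)' loop: scan only the frontier, break when nothing new
def pvB_loop (a2e e2a : PySem.Dict String (List String)) : Nat → List String → PySem.Set String → PySem.Set String
  | 0, _, seen => seen
  | n+1, frontier, seen =>
    let r := frontier.foldl (fun p t => pvB_scan (e2a.getD t []) (pvB_scan (a2e.getD t []) p)) (seen, [])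
    if r.2 = [] then r.1 else pvB_loop a2e e2a n r.2 r.1

def expand_alias_tokens_alt (tokens : List String) (acc_to_entries : List (String × List String)) (entry_to_acc : List (String × List String)) (rounds : Int) : List String :=
  pvB_loop (PySem.Dict.mk acc_to_entries) (PySem.Dict.mk entry_to_acc) rounds.toNat (PySem.List.dedup tokens) (PySem.Set.ofList tokens)

-- ===== PRECONDITION & SPEC =====
def Spec_expand_alias_tokens (tokens : List String) (acc_to_entries : List (String × List String)) (entry_to_acc : List (String × List String)) (rounds : Int) (out : List String) : Prop := out = expand_alias_tokens_alt tokens acc_to_entries entry_to_acc rounds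
instance (tokens : List String) (acc_to_entries : List (String × List String)) (entry_to_acc : List (String × List String)) (rounds : Int) (out : List String) : Decidable (Spec_expand_alias_tokens tokens acc_to_entries entry_to_acc rounds out) := by unfold Spec_expand_alias_tokens; infer_instance

-- ===== CLAIM (what is proved, stated in full; the proofs are below) =====
def Claim_equal_expand_alias_tokens : Prop := ∀ (tokens : List String) (acc_to_entries : List (String × List String)) (entry_to_acc : List (String × List String)) (rounds : Int), Dom_expand_alias_tokens tokens acc_to_entries entry_to_acc rounds → Spec_expand_alias_tokens tokens acc_to_entries entry_to_acc rounds (expand_alias_tokens tokens acc_to_entries entry_to_acc rounds)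

-- ===== LEMMAS AND PROOFS =====

-- the combined neighbour list of one token
def pvF (a2e e2a : PySem.Dict String (List String)) (t : String) : List String :=
  a2e.getD t [] ++ e2a.getD t []

-- adding only already-present elements is a no-op
theorem pv_update_skip (s : PySem.Set String) (L : List String) (h : ∀ x ∈ L, x ∈ s) :
    PySem.Set.update s L = s := by
  rw [PySem.Set.update_eq_append_filter]
  have hf : (PySem.Set.ofList L).filter (fun y => !(PySem.Set.contains s y)) = [] := by
    rw [List.filter_eq_nil_iff]
    intro x hx
    have hxL : x ∈ L := (PySem.Set.mem_ofList (xs := L) (y := x)).mp hx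
    simp
    exact h x hxL
  rw [hf, List.append_nil]

-- update ignores duplicates in its argument
theorem pv_update_ofList (s : PySem.Set String) (L : List String) :
    PySem.Set.update s (PySem.Set.ofList L) = PySem.Set.update s L := by
  rw [PySem.Set.update_eq_append_filter, PySem.Set.update_eq_append_filter,
    PySem.Set.ofList_ofList]

-- A's round is one big update by the concatenated neighbour lists
theorem pv_foldl_update (g1 g2 : String → List String) :
    ∀ (cur : List String) (s : PySem.Set String),
      cur.foldl (fun add t => PySem.Set.update (PySem.Set.update add (g1 t)) (g2 t)) s
        = PySem.Set.update s (cur.flatMap (fun t => g1 t ++ g2 t))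
  | [], s => by simp [PySem.Set.update_nil]
  | t :: cur, s => by
    rw [List.foldl_cons, pv_foldl_update g1 g2 cur, List.flatMap_cons,
      PySem.Set.update_append, PySem.Set.update_append]

theorem pvA_round_eq (a2e e2a : PySem.Dict String (List String)) (cur : PySem.Set String) :
    pvA_round a2e e2a cur = PySem.Set.ofList (cur.flatMap (pvF a2e e2a)) := by
  unfold pvA_round pvF
  simp only [PySem.Set.union_eq_update]
  rw [pv_foldl_update]
  exact PySem.Set.update_nil_left _

-- B's inner scan, characterised: it updates the seen set and appends exactly the new elements
theorem pvB_scan_spec (L : List String) (s : PySem.Set String) (acc : List String) :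
    pvB_scan L (s, acc) =
      (PySem.Set.update s L,
       acc ++ (PySem.Set.ofList L).filter (fun y => !(PySem.Set.contains s y))) := by
  induction L using List.reverseRecOn with
  | nil => simp [pvB_scan, PySem.Set.update_nil, PySem.Set.ofList_nil]
  | append_singleton L u ih =>
    show (L ++ [u]).foldl _ _ = _
    rw [List.foldl_append]
    have hscan : L.foldl (fun p u => if PySem.Set.contains p.1 u then p else (PySem.Set.add p.1 u, p.2 ++ [u])) (s, acc) = pvB_scan L (s, acc) := rfl
    rw [hscan, ih]
    have hupd : PySem.Set.update s (L ++ [u]) = PySem.Set.add (PySem.Set.update s L) u := by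
      rw [PySem.Set.update_append, PySem.Set.update_cons, PySem.Set.update_nil]
    rw [PySem.Set.ofList_append_singleton]
    by_cases hu : u ∈ PySem.Set.update s L
    · have hc : PySem.Set.contains (PySem.Set.update s L) u = true := by
        simpa using hu
      simp only [List.foldl_cons, List.foldl_nil, hc, if_true]
      rw [hupd, PySem.Set.add_of_mem hu]
      by_cases hL : u ∈ PySem.Set.ofList L
      · rw [PySem.Set.add_of_mem hL]
      · have hus : u ∈ s := by
          simp [PySem.Set.mem_update] at hu
          simp [PySem.Set.mem_ofList] at hL
          tauto
        rw [PySem.Set.add_of_not_mem hL]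
        simp [List.filter_append, hus]
    · have hc : PySem.Set.contains (PySem.Set.update s L) u = false := by
        simpa using hu
      have hu' : u ∉ s ∧ u ∉ L := by
        simp [PySem.Set.mem_update] at hu
        tauto
      have hnL : u ∉ PySem.Set.ofList L := by
        simp [PySem.Set.mem_ofList]
        exact hu'.2
      simp only [List.foldl_cons, List.foldl_nil, hc, Bool.false_eq_true, if_false]
      rw [hupd, PySem.Set.add_of_not_mem hnL]
      simp [List.filter_append, hu'.1, List.append_assoc]

-- B's round fold over the frontier is one scan of the concatenated neighbour lists
theorem pvB_foldl_eq (a2e e2a : PySem.Dict String (List String)) :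
    ∀ (fr : List String) (p : PySem.Set String × List String),
      fr.foldl (fun p t => pvB_scan (e2a.getD t []) (pvB_scan (a2e.getD t []) p)) p
        = pvB_scan (fr.flatMap (pvF a2e e2a)) p
  | [], p => by simp [pvB_scan]
  | t :: fr, p => by
    rw [List.foldl_cons, pvB_foldl_eq a2e e2a fr, List.flatMap_cons]
    simp [pvB_scan, pvF, List.foldl_append]

-- the main induction: A scanning all of cur = B scanning only the frontier, given every
-- neighbour of a non-frontier element of cur is already in cur
theorem pv_loop_eq (a2e e2a : PySem.Dict String (List String)) :
    ∀ (n : Nat) (rest frontier : List String),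
      (∀ t ∈ rest, ∀ x ∈ pvF a2e e2a t, x ∈ rest ++ frontier) →
      pvA_loop a2e e2a n (rest ++ frontier) = pvB_loop a2e e2a n frontier (rest ++ frontier) := by
  intro n
  induction n with
  | zero => intro rest frontier _; rfl
  | succ n ih =>
    intro rest frontier hrest
    have hrestmem : ∀ x ∈ rest.flatMap (pvF a2e e2a), x ∈ rest ++ frontier := by
      intro x hx
      rcases List.mem_flatMap.mp hx with ⟨t, ht, hxt⟩
      exact hrest t ht x hxt
    have hM : (rest ++ frontier).flatMap (pvF a2e e2a)
        = rest.flatMap (pvF a2e e2a) ++ frontier.flatMap (pvF a2e e2a) := List.flatMap_append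
    have hA_upd : PySem.Set.update (rest ++ frontier) ((rest ++ frontier).flatMap (pvF a2e e2a))
        = PySem.Set.update (rest ++ frontier) (frontier.flatMap (pvF a2e e2a)) := by
      rw [hM, PySem.Set.update_append, pv_update_skip _ _ hrestmem]
    have h_union : PySem.Set.union (rest ++ frontier)
          (PySem.Set.ofList ((rest ++ frontier).flatMap (pvF a2e e2a)))
        = PySem.Set.update (rest ++ frontier) (frontier.flatMap (pvF a2e e2a)) := by
      rw [PySem.Set.union_eq_update, pv_update_ofList, hA_upd]
    have h_upd_eq : PySem.Set.update (rest ++ frontier) (frontier.flatMap (pvF a2e e2a))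
        = (rest ++ frontier)
          ++ (PySem.Set.ofList (frontier.flatMap (pvF a2e e2a))).filter
               (fun y => !(PySem.Set.contains (rest ++ frontier) y)) :=
      PySem.Set.update_eq_append_filter _ _
    have hB : pvB_loop a2e e2a (n + 1) frontier (rest ++ frontier)
        = (if ((PySem.Set.ofList (frontier.flatMap (pvF a2e e2a))).filter
                 (fun y => !(PySem.Set.contains (rest ++ frontier) y))) = []
           then PySem.Set.update (rest ++ frontier) (frontier.flatMap (pvF a2e e2a))
           else pvB_loop a2e e2a n
                  ((PySem.Set.ofList (frontier.flatMap (pvF a2e e2a))).filter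
                     (fun y => !(PySem.Set.contains (rest ++ frontier) y)))
                  (PySem.Set.update (rest ++ frontier) (frontier.flatMap (pvF a2e e2a)))) := by
      simp only [pvB_loop, pvB_foldl_eq a2e e2a, pvB_scan_spec, List.nil_append]
    have hA : pvA_loop a2e e2a (n + 1) (rest ++ frontier)
        = (if PySem.Set.issubset (PySem.Set.ofList ((rest ++ frontier).flatMap (pvF a2e e2a)))
               (rest ++ frontier)
           then (rest ++ frontier : PySem.Set String)
           else pvA_loop a2e e2a n
                  (PySem.Set.union (rest ++ frontier)
                    (PySem.Set.ofList ((rest ++ frontier).flatMap (pvF a2e e2a))))) := by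
      simp only [pvA_loop, pvA_round_eq]
    rw [hA, hB]
    by_cases hsub : PySem.Set.issubset
        (PySem.Set.ofList ((rest ++ frontier).flatMap (pvF a2e e2a))) (rest ++ frontier) = true
    · -- A breaks; B's frontier scan finds nothing new
      have hsub' : ∀ x ∈ (rest ++ frontier).flatMap (pvF a2e e2a), x ∈ rest ++ frontier := by
        intro x hx
        exact (PySem.Set.issubset_iff _ _).mp hsub x ((PySem.Set.mem_ofList _ _).mpr hx)
      have hskip : PySem.Set.update (rest ++ frontier) (frontier.flatMap (pvF a2e e2a))
          = rest ++ frontier := by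
        rw [← hA_upd, pv_update_skip _ _ hsub']
      have hF : ((PySem.Set.ofList (frontier.flatMap (pvF a2e e2a))).filter
            (fun y => !(PySem.Set.contains (rest ++ frontier) y))) = [] := by
        have := h_upd_eq
        rw [hskip] at this
        exact (List.self_eq_append_right.mp this)
      rw [if_pos hsub, if_pos hF, hskip]
    · -- A recurses; B's frontier scan found something new
      have hF : ((PySem.Set.ofList (frontier.flatMap (pvF a2e e2a))).filter
            (fun y => !(PySem.Set.contains (rest ++ frontier) y))) ≠ [] := by
        intro hFnil
        apply hsub
        rw [PySem.Set.issubset_iff]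
        intro x hx
        have hxM : x ∈ (rest ++ frontier).flatMap (pvF a2e e2a) :=
          (PySem.Set.mem_ofList _ _).mp hx
        have hxu : x ∈ PySem.Set.update (rest ++ frontier)
            ((rest ++ frontier).flatMap (pvF a2e e2a)) :=
          (PySem.Set.mem_update _ _ _).mpr (Or.inr hxM)
        rw [hA_upd, h_upd_eq, hFnil, List.append_nil] at hxu
        exact hxu
      rw [if_neg hsub, if_neg hF, h_union, h_upd_eq]
      apply ih
      intro t ht x hx
      have hxM : x ∈ (rest ++ frontier).flatMap (pvF a2e e2a) :=
        List.mem_flatMap.mpr ⟨t, ht, hx⟩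
      have hxu : x ∈ PySem.Set.update (rest ++ frontier)
          ((rest ++ frontier).flatMap (pvF a2e e2a)) :=
        (PySem.Set.mem_update _ _ _).mpr (Or.inr hxM)
      rw [hA_upd, h_upd_eq] at hxu
      exact hxu

-- ===== VERDICT (by name: the statement is the Claim_ definition above) =====
theorem expand_alias_tokens_spec : Claim_equal_expand_alias_tokens := by
  intro tokens a2e e2a rounds _
  unfold Spec_expand_alias_tokens expand_alias_tokens expand_alias_tokens_alt
  have h := pv_loop_eq (PySem.Dict.mk a2e) (PySem.Dict.mk e2a) rounds.toNat []
      (PySem.Set.ofList tokens) (by intro t ht; simp at ht)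
  simpa [PySem.List.dedup_eq_ofList] using h
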